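-- pv_equiv track=rewrite | github.com/ozkayas/leetcode_solutions | 9999-A2Z-OA/Customer Query.py | search_suggestions
-- ===== SOURCE A (Python) =====
-- def search_suggestions(repository, customer_query):
--     res = []
--
--     # Iterate through each prefix length
--     for i in range(1, len(customer_query)):
--         s = customer_query[:i + 1].lower()  # Take the prefix of length i+1
--         temp = []
--
--         # Check each word in the repository if it starts with the prefix
--         for word in repository:
--             if word.lower().startswith(s):
--                 temp.append(word.lower())
--
--         # Sort the temporary list lexicographically
--         temp.sort()
--
--         # Take the first 3 elements from the sorted list
--         res.append(temp[:3])
--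
--     return res
-- ===== SOURCE B (Python) =====
-- def search_suggestions(repository, customer_query):
--     # Sort the lowered repository once; then narrow a single candidate list
--     # as the prefix grows (each prefix extends the previous one), so each
--     # step only scans the already-matching candidates, which stay sorted.
--     candidates = sorted(w.lower() for w in repository)
--     q = customer_query.lower()
--     res = []
--     for i in range(1, len(q)):
--         p = q[:i + 1]
--         candidates = [w for w in candidates if w.startswith(p)]
--         res.append(candidates[:3])
--     return res
-- ===== Notes on version B (the rewrite author's own statement) =====
-- stated objective: faster
-- what changed: B sorts the lowered repository once and then progressively narrows a single sorted candidate list as the prefix grows (each prefix extends the previous one), instead of re-filtering and re-sorting the whole repository for every prefix.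
import Mathlib
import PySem

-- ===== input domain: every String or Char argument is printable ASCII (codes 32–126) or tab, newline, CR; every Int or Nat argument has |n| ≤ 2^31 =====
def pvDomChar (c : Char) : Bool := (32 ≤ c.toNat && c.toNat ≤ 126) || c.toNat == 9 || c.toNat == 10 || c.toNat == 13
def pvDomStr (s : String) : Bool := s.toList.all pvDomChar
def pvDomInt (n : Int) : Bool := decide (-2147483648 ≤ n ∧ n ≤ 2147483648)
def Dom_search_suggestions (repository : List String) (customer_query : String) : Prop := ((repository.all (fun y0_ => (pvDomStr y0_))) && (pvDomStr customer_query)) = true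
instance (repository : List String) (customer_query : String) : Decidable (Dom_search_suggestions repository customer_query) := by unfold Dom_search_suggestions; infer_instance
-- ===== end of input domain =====

-- B sorts the lowered repository once and progressively narrows one candidate list
-- as the prefix grows, instead of re-filtering and re-sorting per prefix (objective: faster, constant-factor).

-- ===== PORT A =====
def search_suggestions (repository : List String) (customer_query : String) : List (List String) :=
  (PySem.List.pyRange 1 (PySem.Str.len customer_query) 1).foldl
    (fun res i =>
      let s := PySem.Str.lower (PySem.Str.slice customer_query none (some (i + 1)))
      let temp := repository.foldl
        (fun temp word =>
          if PySem.Str.startswith (PySem.Str.lower word) s then temp ++ [PySem.Str.lower word]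
          else temp) []
      res ++ [PySem.List.slice (PySem.List.sorted temp (fun x => x)) none (some 3)])
    []

-- ===== PORT B =====
def search_suggestions_alt (repository : List String) (customer_query : String) : List (List String) :=
  let q := PySem.Str.lower customer_query
  ((PySem.List.pyRange 1 (PySem.Str.len q) 1).foldl
    (fun st i =>
      let p := PySem.Str.slice q none (some (i + 1))
      let cands := st.1.filter (fun w => PySem.Str.startswith w p)
      (cands, st.2 ++ [PySem.List.slice cands none (some 3)]))
    (PySem.List.sorted (repository.map PySem.Str.lower) (fun x => x), [])).2

-- ===== PRECONDITION & SPEC =====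
def Spec_search_suggestions (repository : List String) (customer_query : String) (out : List (List String)) : Prop := out = search_suggestions_alt repository customer_query
instance (repository : List String) (customer_query : String) (out : List (List String)) : Decidable (Spec_search_suggestions repository customer_query out) := by unfold Spec_search_suggestions; infer_instance

-- ===== CLAIM (what is proved, stated in full; the proofs are below) =====
def Claim_equal_search_suggestions : Prop := ∀ (repository : List String) (customer_query : String), Dom_search_suggestions repository customer_query → Spec_search_suggestions repository customer_query (search_suggestions repository customer_query)

-- ===== LEMMAS AND PROOFS =====

-- sorting a filtered list = filtering the sorted list (stability of Python's sort)
lemma sorted_filter_comm (L : List String) (P : String → Bool) :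
    PySem.List.sorted (L.filter P) (fun x => x) =
      (PySem.List.sorted L (fun x => x)).filter P := by
  apply PySem.List.sorted_id_eq_of_perm_of_pairwise
  · exact (PySem.List.sorted_perm L _ _).filter P
  · exact (PySem.List.sorted_pairwise L _).filter P

-- lowering commutes with taking a prefix slice (both sides seen through toList)
lemma lower_slice_toList (s : String) (b : Int) (hb : 0 ≤ b) :
    (PySem.Str.lower (PySem.Str.slice s none (some b))).toList =
      (PySem.Str.slice (PySem.Str.lower s) none (some b)).toList := by
  simp [PySem.Str.toList_lower, PySem.Str.toList_slice,
    PySem.List.slice_to _ hb, PySem.Chars.lower, List.map_take]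

-- a longer prefix of q implies the shorter one
lemma startswith_longer (q w : String) (a b : Int) (hab : a ≤ b) (h0 : 0 ≤ a)
    (h : PySem.Str.startswith w (PySem.Str.slice q none (some b)) = true) :
    PySem.Str.startswith w (PySem.Str.slice q none (some a)) = true := by
  rw [PySem.Str.startswith_eq, PySem.Chars.startswith_iff] at h ⊢
  simp only [PySem.Str.toList_slice, PySem.Chars.slice_eq_listSlice,
    PySem.List.slice_to _ h0, PySem.List.slice_to _ (le_trans h0 hab)] at h ⊢
  refine List.IsPrefix.trans ?_ h
  have : a.toNat ≤ b.toNat := Int.toNat_le_toNat hab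
  calc List.take a.toNat q.toList
      = List.take a.toNat (List.take b.toNat q.toList) := by
        rw [List.take_take, Nat.min_eq_left this]
    _ <+: List.take b.toNat q.toList := List.take_prefix _ _

-- A's i-th entry equals the filtered-sorted form used by B
set_option maxHeartbeats 1000000 in
lemma entryA_eq (repository : List String) (customer_query : String) (i : Int) (hi : 1 ≤ i) :
    PySem.List.sorted
      (repository.foldl
        (fun temp word =>
          if PySem.Str.startswith (PySem.Str.lower word)
              (PySem.Str.lower (PySem.Str.slice customer_query none (some (i + 1)))) = true
          then temp ++ [PySem.Str.lower word] else temp) [])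
      (fun x => x) =
    (PySem.List.sorted (repository.map PySem.Str.lower) (fun x => x)).filter
      (fun w => PySem.Str.startswith w
        (PySem.Str.slice (PySem.Str.lower customer_query) none (some (i + 1)))) := by
  rw [PySem.List.foldl_append_if
    (fun word => PySem.Str.startswith (PySem.Str.lower word)
      (PySem.Str.lower (PySem.Str.slice customer_query none (some (i + 1)))))
    PySem.Str.lower repository [], List.nil_append]
  have hsw : ∀ w : String,
      PySem.Str.startswith w
        (PySem.Str.lower (PySem.Str.slice customer_query none (some (i + 1)))) =
      PySem.Str.startswith w
        (PySem.Str.slice (PySem.Str.lower customer_query) none (some (i + 1))) := by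
    intro w
    rw [PySem.Str.startswith_eq, PySem.Str.startswith_eq,
      lower_slice_toList customer_query (i + 1) (by omega)]
  have : List.map PySem.Str.lower
      (repository.filter (fun word => PySem.Str.startswith (PySem.Str.lower word)
        (PySem.Str.lower (PySem.Str.slice customer_query none (some (i + 1)))))) =
      List.filter (fun w => PySem.Str.startswith w
        (PySem.Str.slice (PySem.Str.lower customer_query) none (some (i + 1))))
        (repository.map PySem.Str.lower) := by
    rw [List.filter_map]
    exact congrArg (List.map PySem.Str.lower)
      (List.filter_congr (fun x _ => by
        simpa [Function.comp] using hsw (PySem.Str.lower x)))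
  rw [this, sorted_filter_comm]

-- A as a map over the range
set_option maxHeartbeats 1000000 in
lemma A_eq_map (repository : List String) (customer_query : String) :
    search_suggestions repository customer_query =
      (PySem.List.pyRange 1 (PySem.Str.len customer_query) 1).map
        (fun i => PySem.List.slice
          ((PySem.List.sorted (repository.map PySem.Str.lower) (fun x => x)).filter
            (fun w => PySem.Str.startswith w
              (PySem.Str.slice (PySem.Str.lower customer_query) none (some (i + 1)))))
          none (some 3)) := by
  simp only [search_suggestions]
  rw [PySem.List.foldl_append_singleton_eq_map
    (fun i => PySem.List.slice
      (PySem.List.sorted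
        (repository.foldl
          (fun temp word =>
            if PySem.Str.startswith (PySem.Str.lower word)
                (PySem.Str.lower (PySem.Str.slice customer_query none (some (i + 1)))) = true
            then temp ++ [PySem.Str.lower word] else temp) [])
        (fun x => x)) none (some 3))]
  rw [List.nil_append]
  apply List.map_congr_left
  intro i hi
  have h1 : 1 ≤ i := (PySem.List.mem_pyRange_one.mp hi).1
  rw [entryA_eq repository customer_query i h1]

-- B's loop invariant: the candidate list is the sorted-lowered repository filtered by the
-- current prefix, and the accumulated result is the map of the filtered-sorted entries.
lemma B_loop (repository : List String) (customer_query : String) (m : Nat) :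
    ((PySem.List.pyRange 1 (1 + (m : Int)) 1).foldl
      (fun st i =>
        let p := PySem.Str.slice (PySem.Str.lower customer_query) none (some (i + 1))
        let cands := st.1.filter (fun w => PySem.Str.startswith w p)
        (cands, st.2 ++ [PySem.List.slice cands none (some 3)]))
      (PySem.List.sorted (repository.map PySem.Str.lower) (fun x => x), [])) =
    ((if m = 0 then PySem.List.sorted (repository.map PySem.Str.lower) (fun x => x)
      else (PySem.List.sorted (repository.map PySem.Str.lower) (fun x => x)).filter
        (fun w => PySem.Str.startswith w
          (PySem.Str.slice (PySem.Str.lower customer_query) none (some ((m : Int) + 1))))),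
     (PySem.List.pyRange 1 (1 + (m : Int)) 1).map
        (fun i => PySem.List.slice
          ((PySem.List.sorted (repository.map PySem.Str.lower) (fun x => x)).filter
            (fun w => PySem.Str.startswith w
              (PySem.Str.slice (PySem.Str.lower customer_query) none (some (i + 1)))))
          none (some 3))) := by
  induction m with
  | zero =>
      rw [show ((1 : Int) + (0 : Nat) = 1) by norm_num,
        PySem.List.pyRange_one_eq_nil (le_refl 1)]
      simp
  | succ k ih =>
      have hcons : PySem.List.pyRange 1 (1 + ((k + 1 : Nat) : Int)) 1 =
          PySem.List.pyRange 1 (1 + (k : Int)) 1 ++ [1 + (k : Int)] := by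
        rw [show ((1 : Int) + ((k + 1 : Nat) : Int) = (1 + (k : Int)) + 1) by push_cast; ring]
        exact PySem.List.pyRange_one_succ_right (by omega)
      rw [hcons, List.foldl_append, ih, List.map_append]
      have hstep :
          (if k = 0 then PySem.List.sorted (repository.map PySem.Str.lower) (fun x => x)
            else (PySem.List.sorted (repository.map PySem.Str.lower) (fun x => x)).filter
              (fun w => PySem.Str.startswith w
                (PySem.Str.slice (PySem.Str.lower customer_query) none (some ((k : Int) + 1))))).filter
            (fun w => PySem.Str.startswith w
              (PySem.Str.slice (PySem.Str.lower customer_query) none (some ((1 + (k : Int)) + 1)))) =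
          (PySem.List.sorted (repository.map PySem.Str.lower) (fun x => x)).filter
            (fun w => PySem.Str.startswith w
              (PySem.Str.slice (PySem.Str.lower customer_query) none (some ((1 + (k : Int)) + 1)))) := by
        by_cases hk : k = 0
        · simp [hk]
        · rw [if_neg hk, List.filter_filter]
          apply List.filter_congr
          intro w _
          cases hw : PySem.Str.startswith w
              (PySem.Str.slice (PySem.Str.lower customer_query) none (some ((1 + (k : Int)) + 1))) with
          | false => rw [Bool.false_and]
          | true =>
              rw [startswith_longer (PySem.Str.lower customer_query) w
                ((k : Int) + 1) ((1 + (k : Int)) + 1) (by omega) (by omega) hw, Bool.true_and]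
      simp only [List.foldl_cons, List.foldl_nil, List.map_cons, List.map_nil]
      have hc : ((k + 1 : Nat) : Int) = 1 + (k : Int) := by push_cast; ring
      rw [hc, if_neg (Nat.succ_ne_zero k), Prod.mk.injEq]
      exact ⟨hstep, by rw [hstep]⟩
  
-- B as the same map over the range
lemma B_eq_map (repository : List String) (customer_query : String) :
    search_suggestions_alt repository customer_query =
      (PySem.List.pyRange 1 (PySem.Str.len customer_query) 1).map
        (fun i => PySem.List.slice
          ((PySem.List.sorted (repository.map PySem.Str.lower) (fun x => x)).filter
            (fun w => PySem.Str.startswith w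
              (PySem.Str.slice (PySem.Str.lower customer_query) none (some (i + 1)))))
          none (some 3)) := by
  have hlen : PySem.Str.len (PySem.Str.lower customer_query) = PySem.Str.len customer_query := by
    rw [PySem.Str.len_eq, PySem.Str.len_eq, PySem.Str.toList_lower]
    simp [PySem.Chars.lower]
  simp only [search_suggestions_alt]
  rw [hlen]
  by_cases hn : PySem.Str.len customer_query ≤ 1
  · rw [PySem.List.pyRange_one_eq_nil hn]
    simp
  · rw [not_le] at hn
    obtain ⟨m, hm⟩ : ∃ m : Nat, PySem.Str.len customer_query = 1 + (m : Int) :=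
      ⟨(PySem.Str.len customer_query - 1).toNat, by omega⟩
    rw [hm, B_loop repository customer_query m]

-- ===== VERDICT (by name: the statement is the Claim_ definition above) =====
theorem search_suggestions_spec : Claim_equal_search_suggestions := by
  intro repository customer_query _
  unfold Spec_search_suggestions
  rw [A_eq_map, B_eq_map]
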